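-- pv_equiv track=rewrite | github.com/mainlp/ClimatELi | utils/visualize.py | split_genre
-- ===== SOURCE A (Python) =====
-- def split_genre(annos):
--     sub_annos = {}
--     for key, value in annos.items():
--         sub_key = key.split("_")[1]
--         if sub_key not in sub_annos:
--             sub_annos[sub_key] = {}
--         sub_annos[sub_key][key] = value
--     return sub_annos
-- ===== SOURCE B (Python) =====
-- def split_genre(annos):
--     groups = dict.fromkeys(k.split("_")[1] for k in annos)
--     return {
--         g: {k: v for k, v in annos.items() if k.split("_")[1] == g}
--         for g in groups
--     }
-- ===== Notes on version B (the rewrite author's own statement) =====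
-- stated objective: alternative
-- what changed: A builds the nested dict incrementally in one pass with per-key membership tests and in-place mutation; B first computes the ordered list of distinct genre sub-keys with dict.fromkeys and then builds each group by one comprehension pass over annos per group.
import Mathlib
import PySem

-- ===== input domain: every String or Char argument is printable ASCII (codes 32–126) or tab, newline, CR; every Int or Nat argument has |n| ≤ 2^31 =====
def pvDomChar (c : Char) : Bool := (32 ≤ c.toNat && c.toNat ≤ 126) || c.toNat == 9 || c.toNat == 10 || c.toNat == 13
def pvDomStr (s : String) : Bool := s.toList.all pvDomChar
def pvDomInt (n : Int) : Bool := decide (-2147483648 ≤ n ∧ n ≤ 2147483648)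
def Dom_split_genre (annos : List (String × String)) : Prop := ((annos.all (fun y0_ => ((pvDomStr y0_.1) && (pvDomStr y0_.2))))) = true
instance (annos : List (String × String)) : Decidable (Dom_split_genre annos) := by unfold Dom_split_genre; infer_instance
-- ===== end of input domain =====

-- B computes the ordered distinct genre sub-keys first (dict.fromkeys) and then collects each
-- group by one filtering pass per group, instead of A's single incremental nested-dict pass.
-- Pre_ excludes association lists with duplicate keys (a Python dict cannot contain them) and
-- keys without "_" (on which A raises IndexError).


-- key.split("_")[1]  (both Pythons compute exactly this expression; index 1 exists under Pre_)
def pvSubKey (key : String) : String :=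
  PySem.List.pyGetD ((PySem.Str.split? key "_").getD []) 1 ""

-- ===== PORT A =====
-- the body of A's for-loop over annos.items()
def pvStep (sub_annos : PySem.Dict String (PySem.Dict String String)) (p : String × String) :
    PySem.Dict String (PySem.Dict String String) :=
  let sub_key := pvSubKey p.1
  let sub_annos := if sub_annos.contains sub_key then sub_annos
                   else sub_annos.insert sub_key (PySem.Dict.empty : PySem.Dict String String)
  sub_annos.insert sub_key ((sub_annos.getD sub_key PySem.Dict.empty).insert p.1 p.2)

def split_genre (annos : List (String × String)) : List (String × List (String × String)) :=
  let sub_annos := annos.foldl pvStep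
    (PySem.Dict.empty : PySem.Dict String (PySem.Dict String String))
  sub_annos.items.map (fun q => (q.1, q.2.items))

-- ===== PORT B =====
def split_genre_alt (annos : List (String × String)) : List (String × List (String × String)) :=
  let groups := PySem.List.dedup (annos.map (fun p => pvSubKey p.1))
  groups.map (fun g =>
    (g, ((annos.filter (fun p => pvSubKey p.1 == g)).foldl
           (fun d p => d.insert p.1 p.2)
           (PySem.Dict.empty : PySem.Dict String String)).items))

-- ===== PRECONDITION & SPEC =====
-- Pre_ excludes duplicate keys (A's parameter is a dict, which cannot contain them) and keys
-- without an "_" (key.split("_")[1] raises IndexError in A there).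
def Pre_split_genre (annos : List (String × String)) : Prop :=
  (annos.map Prod.fst).Nodup ∧ ∀ p ∈ annos, 2 ≤ ((PySem.Str.split? p.1 "_").getD []).length
instance (annos : List (String × String)) : Decidable (Pre_split_genre annos) := by
  unfold Pre_split_genre; infer_instance

def pvWitness_split_genre : (List (String × String)) :=
  [("doc_news_1", "A"), ("doc_news_2", "B"), ("x_blog", "C")]

def Spec_split_genre (annos : List (String × String)) (out : List (String × List (String × String))) : Prop := out = split_genre_alt annos
instance (annos : List (String × String)) (out : List (String × List (String × String))) : Decidable (Spec_split_genre annos out) := by unfold Spec_split_genre; infer_instance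

-- ===== CLAIM (what is proved, stated in full; the proofs are below) =====
def Claim_equal_split_genre : Prop := ∀ (annos : List (String × String)), Dom_split_genre annos → Pre_split_genre annos → Spec_split_genre annos (split_genre annos)

-- ===== LEMMAS AND PROOFS =====

-- the pairs of l whose sub-key is g, in order (B's inner comprehension)
def pvGather (l : List (String × String)) (g : String) : List (String × String) :=
  l.filter (fun p => pvSubKey p.1 == g)

-- first occurrences of sub-keys of l not yet in seen, in order
def pvNewGroups : List (String × String) → List String → List String
  | [], _ => []
  | p :: t, seen =>
    if pvSubKey p.1 ∈ seen then pvNewGroups t seen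
    else pvSubKey p.1 :: pvNewGroups t (seen ++ [pvSubKey p.1])

theorem pv_newGroups_not_mem {l : List (String × String)} {seen : List String} {g : String}
    (h : g ∈ pvNewGroups l seen) : g ∉ seen := by
  induction l generalizing seen with
  | nil => simp [pvNewGroups] at h
  | cons p t ih =>
    by_cases hm : pvSubKey p.1 ∈ seen
    · exact ih (by simpa [pvNewGroups, hm] using h)
    · simp only [pvNewGroups, if_neg hm, List.mem_cons] at h
      rcases h with h | h
      · simpa [h] using hm
      · intro hg; exact ih h (by simp [hg])

theorem pv_update_newGroups (l : List (String × String)) (seen : List String) :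
    PySem.Set.update seen (l.map (fun p => pvSubKey p.1)) = seen ++ pvNewGroups l seen := by
  induction l generalizing seen with
  | nil => simp [pvNewGroups, PySem.Set.update]
  | cons p t ih =>
    by_cases hm : pvSubKey p.1 ∈ seen
    · simpa [pvNewGroups, hm, PySem.Set.update, PySem.Set.add, PySem.Set.contains] using ih seen
    · simp only [pvNewGroups, if_neg hm, List.map_cons]
      have := ih (seen ++ [pvSubKey p.1])
      simpa [PySem.Set.update, PySem.Set.add, PySem.Set.contains, hm] using this

theorem pvGather_cons_self (p : String × String) (t : List (String × String)) :
    pvGather (p :: t) (pvSubKey p.1) = p :: pvGather t (pvSubKey p.1) := by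
  simp [pvGather]

theorem pvGather_cons_ne {p : String × String} {g : String} (t : List (String × String))
    (hp : pvSubKey p.1 ≠ g) : pvGather (p :: t) g = pvGather t g := by
  simp [pvGather, hp]

theorem pv_inv (l : List (String × String)) (d : PySem.Dict String (PySem.Dict String String))
    (hnd : d.keys.Nodup)
    (hlnd : (l.map Prod.fst).Nodup)
    (hfresh : ∀ p ∈ l, ∀ q ∈ d.items, q.2.contains p.1 = false) :
    (l.foldl pvStep d).items
      = d.items.map (fun q => (q.1, PySem.Dict.mk (q.2.items ++ pvGather l q.1)))
        ++ (pvNewGroups l d.keys).map (fun g => (g, PySem.Dict.mk (pvGather l g))) := by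
  induction l generalizing d with
  | nil =>
    simp [pvGather, pvNewGroups]
  | cons p t ih =>
    simp only [List.map_cons, List.nodup_cons, List.mem_map] at hlnd
    have hp1 : ∀ r ∈ t, r.1 ≠ p.1 := by
      intro r hr he; exact hlnd.1 ⟨r, hr, he⟩
    by_cases hc : d.contains (pvSubKey p.1) = true
    · -- the group already exists: the matching inner dict gets one fresh pair appended
      have hk : pvSubKey p.1 ∈ d.keys := (PySem.Dict.contains_iff_mem_keys d _).mp hc
      set v := (d.getD (pvSubKey p.1) PySem.Dict.empty).insert p.1 p.2 with hv
      have hstep : pvStep d p = d.insert (pvSubKey p.1) v := by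
        simp [pvStep, hc, hv]
      have hitems : (d.insert (pvSubKey p.1) v).items
          = d.items.map (fun r => if (r.1 == pvSubKey p.1) = true then (pvSubKey p.1, v) else r) :=
        PySem.Dict.items_insert_of_contains d v hc
      have hkeys : (d.insert (pvSubKey p.1) v).keys = d.keys := by
        simp only [PySem.Dict.keys, hitems, List.map_map]
        refine List.map_congr_left (fun r hr => ?_)
        by_cases h1 : r.1 = pvSubKey p.1 <;> simp [h1]
      have hfresh' : ∀ r ∈ t, ∀ q ∈ (d.insert (pvSubKey p.1) v).items, q.2.contains r.1 = false := by
        intro r hr q hq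
        rw [hitems] at hq
        rcases List.mem_map.mp hq with ⟨q0, hq0, hq0e⟩
        by_cases h1 : q0.1 = pvSubKey p.1
        · have hq0d : d.getD (pvSubKey p.1) PySem.Dict.empty = q0.2 := by
            have : (pvSubKey p.1, q0.2) ∈ d.items := by rw [← h1]; exact hq0
            exact PySem.Dict.getD_of_mem_items d this hnd _
          have hqe : q = (pvSubKey p.1, v) := by simpa [h1] using hq0e.symm
          have hcontq : q0.2.contains r.1 = false := hfresh r (List.mem_cons_of_mem p hr) q0 hq0
          rw [hqe]
          show v.contains r.1 = false
          rw [hv, hq0d, PySem.Dict.contains_insert]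
          simp [hcontq, hp1 r hr]
        · have hqe : q = q0 := by simpa [h1] using hq0e.symm
          exact hqe ▸ hfresh r (List.mem_cons_of_mem p hr) q0 hq0
      have hIH := ih (d.insert (pvSubKey p.1) v) (hkeys ▸ hnd) hlnd.2 hfresh'
      rw [List.foldl_cons, hstep, hIH, hkeys, hitems, List.map_map]
      have hng : pvNewGroups (p :: t) d.keys = pvNewGroups t d.keys := by
        simp [pvNewGroups, hk]
      rw [hng]
      congr 1
      · refine List.map_congr_left (fun r hr => ?_)
        by_cases h1 : r.1 = pvSubKey p.1
        · have hrd : d.getD (pvSubKey p.1) PySem.Dict.empty = r.2 := by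
            have : (pvSubKey p.1, r.2) ∈ d.items := by rw [← h1]; exact hr
            exact PySem.Dict.getD_of_mem_items d this hnd _
          have hvit : v.items = r.2.items ++ [(p.1, p.2)] := by
            rw [hv, hrd]
            exact PySem.Dict.items_insert_of_not_contains r.2 p.2
              (hfresh p (List.mem_cons_self) r hr)
          have hb : (r.1 == pvSubKey p.1) = true := by simp [h1]
          simp only [Function.comp, hb, if_pos, hvit]
          rw [h1, pvGather_cons_self]
          simp
        · have hb : (r.1 == pvSubKey p.1) = false := by simp [h1]
          simp only [Function.comp, hb, Bool.false_eq_true, if_false]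
          rw [pvGather_cons_ne t (fun he => h1 he.symm)]
      · refine List.map_congr_left (fun g hg => ?_)
        have hgne : pvSubKey p.1 ≠ g := by
          intro he; exact pv_newGroups_not_mem hg (he ▸ hk)
        rw [pvGather_cons_ne t hgne]
    · -- a new group: the outer dict gets a fresh singleton entry appended
      have hcf : d.contains (pvSubKey p.1) = false := by
        cases h : d.contains (pvSubKey p.1) with
        | false => rfl
        | true => exact absurd h hc
      have hknot : pvSubKey p.1 ∉ d.keys := fun hm =>
        hc ((PySem.Dict.contains_iff_mem_keys d _).mpr hm)
      have hstep : pvStep d p = d.insert (pvSubKey p.1) (PySem.Dict.mk [(p.1, p.2)]) := by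
        simp only [pvStep, hcf, Bool.false_eq_true, if_false,
          PySem.Dict.getD_insert_self, PySem.Dict.insert_insert_self]
        rfl
      have hitems : (d.insert (pvSubKey p.1) (PySem.Dict.mk [(p.1, p.2)])).items
          = d.items ++ [(pvSubKey p.1, PySem.Dict.mk [(p.1, p.2)])] :=
        PySem.Dict.items_insert_of_not_contains d _ hcf
      have hkeys : (d.insert (pvSubKey p.1) (PySem.Dict.mk [(p.1, p.2)])).keys
          = d.keys ++ [pvSubKey p.1] :=
        PySem.Dict.keys_insert_of_not_contains d _ hcf
      have hnd' : (d.keys ++ [pvSubKey p.1]).Nodup := by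
        refine List.Nodup.append hnd (List.nodup_singleton _) ?_
        intro a ha hb
        rw [List.mem_singleton] at hb
        exact hknot (hb ▸ ha)
      have hfresh' : ∀ r ∈ t, ∀ q ∈ (d.insert (pvSubKey p.1) (PySem.Dict.mk [(p.1, p.2)])).items,
          q.2.contains r.1 = false := by
        intro r hr q hq
        rw [hitems, List.mem_append] at hq
        rcases hq with hq | hq
        · exact hfresh r (List.mem_cons_of_mem p hr) q hq
        · simp only [List.mem_singleton] at hq
          simp [hq, PySem.Dict.contains_mk, (hp1 r hr).symm]
      have hIH := ih (d.insert (pvSubKey p.1) (PySem.Dict.mk [(p.1, p.2)]))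
        (hkeys ▸ hnd') hlnd.2 hfresh'
      rw [List.foldl_cons, hstep, hIH, hkeys, hitems]
      have hng : pvNewGroups (p :: t) d.keys
          = pvSubKey p.1 :: pvNewGroups t (d.keys ++ [pvSubKey p.1]) := by
        simp [pvNewGroups, hknot]
      rw [hng, List.map_append, List.append_assoc, List.map_cons]
      congr 1
      · refine List.map_congr_left (fun r hr => ?_)
        have h1 : pvSubKey p.1 ≠ r.1 := by
          intro he; exact hknot (he ▸ List.mem_map_of_mem hr)
        rw [pvGather_cons_ne t h1]
      · simp only [List.map_cons, List.map_nil]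
        refine congrArg₂ List.cons ?_ ?_
        · simp [pvGather_cons_self]
        · refine List.map_congr_left (fun g hg => ?_)
          have hgne : pvSubKey p.1 ≠ g := by
            intro he
            exact pv_newGroups_not_mem hg (by simp [he])
          rw [pvGather_cons_ne t hgne]

-- ===== VERDICT (by name: the statement is the Claim_ definition above) =====
-- B's inner dict comprehension over pairs with distinct keys: the items are the pairs themselves
theorem pv_items_fold (l : List (String × String)) (h : (l.map Prod.fst).Nodup) :
    (l.foldl (fun d p => d.insert p.1 p.2) (PySem.Dict.empty : PySem.Dict String String)).items
      = l := by
  have h2 := PySem.Dict.items_foldl_insert_fresh l Prod.fst Prod.snd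
    (PySem.Dict.empty : PySem.Dict String String)
    (fun a _ => PySem.Dict.contains_empty a.1) h
  simpa using h2

theorem split_genre_spec : Claim_equal_split_genre := by
  intro annos _ hpre
  obtain ⟨hnd, -⟩ := hpre
  show split_genre annos = split_genre_alt annos
  have hinv := pv_inv annos PySem.Dict.empty (by simp)
    hnd (fun p _ q hq => by simp [PySem.Dict.empty] at hq)
  have hded : PySem.List.dedup (annos.map (fun p => pvSubKey p.1)) = pvNewGroups annos [] := by
    rw [PySem.List.dedup_eq_ofList, PySem.Set.ofList_eq_foldl]
    simpa [PySem.Set.update] using pv_update_newGroups annos []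
  unfold split_genre split_genre_alt
  show ((annos.foldl pvStep PySem.Dict.empty).items.map (fun q => (q.1, q.2.items)))
      = (PySem.List.dedup (annos.map (fun p => pvSubKey p.1))).map (fun g =>
          (g, ((annos.filter (fun p => pvSubKey p.1 == g)).foldl
                 (fun d p => d.insert p.1 p.2)
                 (PySem.Dict.empty : PySem.Dict String String)).items))
  have hie : (PySem.Dict.empty : PySem.Dict String (PySem.Dict String String)).items = [] := rfl
  have hke : (PySem.Dict.empty : PySem.Dict String (PySem.Dict String String)).keys = [] := rfl
  rw [hie, hke] at hinv
  rw [hinv, hded]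
  simp only [List.map_nil, List.nil_append, List.map_map]
  refine List.map_congr_left (fun g hg => ?_)
  have hsub : (annos.filter (fun p => pvSubKey p.1 == g)).Sublist annos := List.filter_sublist
  have hnodup : ((annos.filter (fun p => pvSubKey p.1 == g)).map Prod.fst).Nodup :=
    List.Nodup.sublist (hsub.map Prod.fst) hnd
  rw [pv_items_fold _ hnodup]
  simp [pvGather, Function.comp]
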